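-- pv_equiv track=rewrite | github.com/yashR4J/interview_prep | dp/lineGame.py | line_game
-- ===== SOURCE A (Python) =====
-- def line_game(l):
--     def helper(i, j, l, memo):
--         if memo[i][j] != -1:
--             return memo[i][j]
--         if j == i + 1:
--             memo[i][j] = max(l[i], l[j])
--         else:
--             x = helper(i+2, j, l, memo) if i + 2 <= j else 0
--             y = helper(i+1, j-1, l, memo) if i + 1 <= j - 1 else 0
--             z = helper(i, j-2, l, memo) if i <= j - 2 else 0
--             memo[i][j] = max(l[i] + min(x, y), l[j] + min(y, z))
--         return memo[i][j]
--
--     memo = [[-1 for _ in range(len(l)+1)] for _ in range(len(l)+1)]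
--     return helper(0, len(l) - 1, l, memo)
-- ===== SOURCE B (Python) =====
-- def line_game(l):
--     n = len(l)
--     memo = [[0] * (n + 1) for _ in range(n + 1)]
--     for gap in range(n):
--         for i in range(n - gap):
--             j = i + gap
--             if gap == 1:
--                 memo[i][j] = max(l[i], l[j])
--             else:
--                 x = memo[i + 2][j] if i + 2 <= j else 0
--                 y = memo[i + 1][j - 1] if i + 1 <= j - 1 else 0
--                 z = memo[i][j - 2] if i <= j - 2 else 0
--                 memo[i][j] = max(l[i] + min(x, y), l[j] + min(y, z))
--     return memo[0][n - 1]
-- ===== Notes on version B (the rewrite author's own statement) =====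
-- stated objective: alternative
-- what changed: Top-down memoized recursion replaced by bottom-up tabulation: fill the interval table by increasing gap = j - i with the same recurrence, no recursion and no -1 sentinel.
import Mathlib
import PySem

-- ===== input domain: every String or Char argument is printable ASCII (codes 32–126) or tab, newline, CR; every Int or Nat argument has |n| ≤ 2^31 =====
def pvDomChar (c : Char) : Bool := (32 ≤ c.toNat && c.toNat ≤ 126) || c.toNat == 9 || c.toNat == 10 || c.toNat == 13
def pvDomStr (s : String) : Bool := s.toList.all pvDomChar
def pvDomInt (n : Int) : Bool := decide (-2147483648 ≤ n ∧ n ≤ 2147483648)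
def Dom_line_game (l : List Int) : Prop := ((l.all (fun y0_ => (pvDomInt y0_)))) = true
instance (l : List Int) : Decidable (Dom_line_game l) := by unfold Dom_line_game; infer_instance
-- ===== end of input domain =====

-- B replaces A's top-down memoized recursion by bottom-up tabulation over increasing interval
-- gap (same recurrence, no recursion); objective: alternative decomposition, same O(n^2) cost.


-- ===== PORT A =====
-- l[i]; every index both programs read is in range on nonempty input (Pre_), where this is exact.
def pvIdx (l : List Int) (i : Int) : Int := (PySem.List.pyGet? l i).getD 0

-- helper(i, j, l, memo) of A.  The memo table only caches the values of this pure recursion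
-- (the -1 sentinel test is its cache check), so the port is the same recursion without the cache.
def lineGameHelper (l : List Int) (i j : Int) : Int :=
  if j = i + 1 then max (pvIdx l i) (pvIdx l j)
  else
    let x := if _h : i + 2 ≤ j then lineGameHelper l (i+2) j else 0
    let y := if _h : i + 1 ≤ j - 1 then lineGameHelper l (i+1) (j-1) else 0
    let z := if _h : i ≤ j - 2 then lineGameHelper l i (j-2) else 0
    max (pvIdx l i + min x y) (pvIdx l j + min y z)
termination_by (j - i).toNat
decreasing_by all_goals omega

def line_game (l : List Int) : Int := lineGameHelper l 0 ((l.length : Int) - 1)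

-- ===== PORT B =====
-- The zero-initialised (n+1)x(n+1) list-of-lists table of Source B is ported as a function
-- Int → Int → Int with pointwise update (unwritten cells read 0, exactly as in Source B;
-- Source B's final read on the empty input hits an unwritten cell, i.e. 0, likewise here).
-- One inner-loop body: assignment memo[i][j] = <recurrence>.
def lineGameStep (l : List Int) (gap : Int) (memo : Int → Int → Int) (i : Int) : Int → Int → Int :=
  let j := i + gap
  fun a b =>
    if a = i ∧ b = j then
      (if gap = 1 then max (pvIdx l i) (pvIdx l j)
       else
         let x := if i + 2 ≤ j then memo (i+2) j else 0
         let y := if i + 1 ≤ j - 1 then memo (i+1) (j-1) else 0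
         let z := if i ≤ j - 2 then memo i (j-2) else 0
         max (pvIdx l i + min x y) (pvIdx l j + min y z))
    else memo a b

def line_game_alt (l : List Int) : Int :=
  let n : Int := l.length
  let memo : Int → Int → Int := fun _ _ => 0
  let memo := (PySem.List.pyRange 0 n 1).foldl
    (fun memo gap => (PySem.List.pyRange 0 (n - gap) 1).foldl (lineGameStep l gap) memo) memo
  memo 0 (n - 1)

-- ===== PRECONDITION & SPEC =====
-- A raises IndexError on the empty list (it indexes the list on the degenerate interval); excluded.
def Pre_line_game (l : List Int) : Prop := l ≠ []
instance (l : List Int) : Decidable (Pre_line_game l) := by unfold Pre_line_game; infer_instance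
def pvWitness_line_game : List Int := [1, 2, 3]

def Spec_line_game (l : List Int) (out : Int) : Prop := out = line_game_alt l
instance (l : List Int) (out : Int) : Decidable (Spec_line_game l out) := by unfold Spec_line_game; infer_instance

-- ===== CLAIM (what is proved, stated in full; the proofs are below) =====
def Claim_equal_line_game : Prop := ∀ (l : List Int), Dom_line_game l → Pre_line_game l → Spec_line_game l (line_game l)

-- ===== LEMMAS AND PROOFS =====

-- One write of the inner loop preserves the table invariant.
lemma lineGame_step_inv (l : List Int) (n gap k : Int) (memo : Int → Int → Int)
    (hg : 0 ≤ gap) (hk : 0 ≤ k) (hkn : k < n - gap)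
    (h : ∀ a b, memo a b
      = if 0 ≤ a ∧ a ≤ b ∧ b < n ∧ (b - a < gap ∨ (b - a = gap ∧ a < k)) then lineGameHelper l a b else 0)
    (a b : Int) :
    lineGameStep l gap memo k a b
      = if 0 ≤ a ∧ a ≤ b ∧ b < n ∧ (b - a < gap ∨ (b - a = gap ∧ a < k + 1)) then lineGameHelper l a b else 0 := by
  simp only [lineGameStep]
  by_cases hab : a = k ∧ b = k + gap
  · obtain ⟨ha, hb⟩ := hab
    subst ha; subst hb
    have hcnew : 0 ≤ a ∧ a ≤ a + gap ∧ a + gap < n ∧ (a + gap - a < gap ∨ (a + gap - a = gap ∧ a < a + 1)) := by omega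
    rw [if_pos ⟨rfl, rfl⟩, if_pos hcnew, lineGameHelper]
    by_cases h1 : gap = 1
    · subst h1
      simp
    · rw [if_neg h1, if_neg (show ¬ a + gap = a + 1 by omega)]
      have hx : (if a + 2 ≤ a + gap then memo (a+2) (a+gap) else 0)
          = (if _h : a + 2 ≤ a + gap then lineGameHelper l (a+2) (a+gap) else 0) := by
        by_cases hc : a + 2 ≤ a + gap
        · rw [if_pos hc, dif_pos hc, h]
          rw [if_pos (by omega)]
        · rw [if_neg hc, dif_neg hc]
      have hy : (if a + 1 ≤ a + gap - 1 then memo (a+1) (a+gap-1) else 0)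
          = (if _h : a + 1 ≤ a + gap - 1 then lineGameHelper l (a+1) (a+gap-1) else 0) := by
        by_cases hc : a + 1 ≤ a + gap - 1
        · rw [if_pos hc, dif_pos hc, h]
          rw [if_pos (by omega)]
        · rw [if_neg hc, dif_neg hc]
      have hz : (if a ≤ a + gap - 2 then memo a (a+gap-2) else 0)
          = (if _h : a ≤ a + gap - 2 then lineGameHelper l a (a+gap-2) else 0) := by
        by_cases hc : a ≤ a + gap - 2
        · rw [if_pos hc, dif_pos hc, h]
          rw [if_pos (by omega)]
        · rw [if_neg hc, dif_neg hc]
      simp only [hx, hy, hz]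
  · rw [if_neg hab, h]
    exact if_congr (by omega) rfl rfl

-- The whole inner loop (gap fixed) extends the invariant across the new diagonal.
lemma lineGame_inner_fold (l : List Int) (n gap : Int) (hg : 0 ≤ gap) :
    ∀ (m : Nat), (m : Int) ≤ n - gap → ∀ memo,
    (∀ a b, memo a b
      = if 0 ≤ a ∧ a ≤ b ∧ b < n ∧ b - a < gap then lineGameHelper l a b else 0) →
    ∀ a b, ((PySem.List.pyRange 0 (m : Int) 1).foldl (lineGameStep l gap) memo) a b
      = if 0 ≤ a ∧ a ≤ b ∧ b < n ∧ (b - a < gap ∨ (b - a = gap ∧ a < (m : Int))) then lineGameHelper l a b else 0 := by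
  intro m
  induction m with
  | zero =>
    intro _ memo h a b
    rw [PySem.List.pyRange_one_eq_nil (by norm_num)]
    simp only [List.foldl_nil]
    rw [h]
    exact if_congr (by omega) rfl rfl
  | succ m ih =>
    intro hm memo h a b
    have hsplit : PySem.List.pyRange 0 ((m + 1 : Nat) : Int) 1
        = PySem.List.pyRange 0 (m : Int) 1 ++ [(m : Int)] := by
      push_cast
      exact PySem.List.pyRange_one_succ_right (by positivity)
    rw [hsplit, List.foldl_append]
    simp only [List.foldl_cons, List.foldl_nil]
    have hmid := ih (by push_cast at hm ⊢; omega) memo h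
    have := lineGame_step_inv l n gap (m : Int) _ hg (by positivity) (by push_cast at hm; omega) hmid a b
    rw [this]
    exact if_congr (by push_cast; omega) rfl rfl

-- The outer loop over gaps fills every cell with the pure recursion's value.
lemma lineGame_outer_fold (l : List Int) (n : Int) :
    ∀ (g : Nat), (g : Int) ≤ n →
    ∀ a b, ((PySem.List.pyRange 0 (g : Int) 1).foldl
        (fun memo gap => (PySem.List.pyRange 0 (n - gap) 1).foldl (lineGameStep l gap) memo)
        (fun _ _ => 0)) a b
      = if 0 ≤ a ∧ a ≤ b ∧ b < n ∧ b - a < (g : Int) then lineGameHelper l a b else 0 := by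
  intro g
  induction g with
  | zero =>
    intro _ a b
    rw [PySem.List.pyRange_one_eq_nil (by norm_num)]
    simp only [List.foldl_nil]
    rw [if_neg (by omega)]
  | succ g ih =>
    intro hg a b
    have hsplit : PySem.List.pyRange 0 ((g + 1 : Nat) : Int) 1
        = PySem.List.pyRange 0 (g : Int) 1 ++ [(g : Int)] := by
      push_cast
      exact PySem.List.pyRange_one_succ_right (by positivity)
    rw [hsplit, List.foldl_append]
    simp only [List.foldl_cons, List.foldl_nil]
    have hcast : ((n - (g : Int)).toNat : Int) = n - (g : Int) := by
      push_cast at hg; omega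
    have hinner := lineGame_inner_fold l n (g : Int) (by positivity)
      ((n - (g : Int)).toNat) (by omega) _ (ih (by push_cast at hg ⊢; omega))
    rw [← hcast]
    rw [hinner a b]
    exact if_congr (by rw [hcast]; push_cast at hg ⊢; omega) rfl rfl

-- ===== VERDICT (by name: the statement is the Claim_ definition above) =====
theorem line_game_spec : Claim_equal_line_game := by
  intro l _ hpre
  unfold Spec_line_game line_game line_game_alt
  have hn : 1 ≤ (l.length : Int) := by
    have : l.length ≠ 0 := fun h => hpre (List.length_eq_zero_iff.mp h)
    omega
  have := lineGame_outer_fold l (l.length : Int) l.length (by omega) 0 ((l.length : Int) - 1)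
  simp only [] at this ⊢
  rw [this, if_pos (by omega)]
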